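-- pv_equiv track=rewrite | github.com/anindyasdas/documents | LG_Backup/ConvAI/ConvAI/apps/ker_ko/ker_response_engine.py | _split_features_as_multiple_sections
-- ===== SOURCE A (Python) =====
-- def _split_features_as_multiple_sections(feature_desc_list):
--     """Split the feature description list to multiple list based on the title i.e., as a list of lists"""
--     final_feature_lists = []
--     temp_feature_list = []
--     for each_feature in feature_desc_list:
--         is_title = each_feature.get("is_title", "")
--         if is_title:
--             if temp_feature_list: final_feature_lists.append(temp_feature_list)
--             temp_feature_list = []
--             temp_feature_list.append(each_feature)
--         else:
--             temp_feature_list.append(each_feature)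
--     final_feature_lists.append(temp_feature_list)
--     return final_feature_lists
-- ===== SOURCE B (Python) =====
-- def _split_features_as_multiple_sections(feature_desc_list):
--     """Two-phase: collect the section boundary indices (0 plus every title index),
--     then slice the list between consecutive boundaries."""
--     bounds = [i for i, f in enumerate(feature_desc_list) if f.get("is_title", "")]
--     if not bounds or bounds[0] != 0:
--         bounds = [0] + bounds
--     bounds.append(len(feature_desc_list))
--     return [feature_desc_list[a:b] for a, b in zip(bounds, bounds[1:])]
-- ===== Notes on version B (the rewrite author's own statement) =====
-- stated objective: alternative
-- what changed: B is a two-phase pass: it first collects the boundary indices (0 plus every index whose feature has a truthy 'is_title'), then builds each section by slicing the original list between consecutive boundaries, instead of A's single forward loop that flushes a running temp list at each title.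
import Mathlib
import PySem

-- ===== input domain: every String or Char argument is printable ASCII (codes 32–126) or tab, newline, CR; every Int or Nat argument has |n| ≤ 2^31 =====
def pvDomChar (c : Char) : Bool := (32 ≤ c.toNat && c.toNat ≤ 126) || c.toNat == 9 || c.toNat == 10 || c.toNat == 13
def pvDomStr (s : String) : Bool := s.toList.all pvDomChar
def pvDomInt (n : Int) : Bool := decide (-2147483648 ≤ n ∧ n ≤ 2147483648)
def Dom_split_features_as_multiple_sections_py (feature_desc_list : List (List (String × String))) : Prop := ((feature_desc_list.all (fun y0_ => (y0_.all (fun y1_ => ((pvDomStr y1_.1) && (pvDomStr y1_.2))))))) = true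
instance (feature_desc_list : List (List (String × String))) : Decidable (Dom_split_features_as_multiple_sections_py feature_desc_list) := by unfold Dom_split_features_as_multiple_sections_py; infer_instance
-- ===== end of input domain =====

-- B is a two-phase pass (collect boundary indices, then slice between consecutive
-- boundaries) instead of A's single forward flush-on-title loop; same O(n) cost.

-- ===== PORT A =====
-- each_feature.get("is_title", "") is truthy iff the string is non-empty
def pvTitle (each_feature : List (String × String)) : Bool :=
  (PySem.Dict.mk each_feature).getD "is_title" "" ≠ ""

def pvStepA (st : List (List (List (String × String))) × List (List (String × String)))
    (each_feature : List (String × String)) :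
    List (List (List (String × String))) × List (List (String × String)) :=
  if pvTitle each_feature then
    ((if st.2 ≠ [] then st.1 ++ [st.2] else st.1), [each_feature])
  else
    (st.1, st.2 ++ [each_feature])

def split_features_as_multiple_sections_py (feature_desc_list : List (List (String × String))) : List (List (List (String × String))) :=
  let st := feature_desc_list.foldl pvStepA ([], [])
  st.1 ++ [st.2]

-- ===== PORT B =====
-- bounds = [i for i, f in enumerate(feature_desc_list) if f.get("is_title", "")]
def pvBoundsB (l : List (List (String × String))) : List Int :=
  ((PySem.List.enumerate l).filter (fun p => pvTitle p.2)).map (fun p => p.1)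

def split_features_as_multiple_sections_py_alt (feature_desc_list : List (List (String × String))) : List (List (List (String × String))) :=
  let bounds0 := pvBoundsB feature_desc_list
  -- if not bounds or bounds[0] != 0: bounds = [0] + bounds
  let bounds1 := match bounds0 with
    | [] => [(0 : Int)]
    | b :: r => if b ≠ 0 then 0 :: b :: r else b :: r
  -- bounds.append(len(feature_desc_list))
  let bounds := bounds1 ++ [(feature_desc_list.length : Int)]
  -- [feature_desc_list[a:b] for a, b in zip(bounds, bounds[1:])]
  (bounds.zip (bounds.drop 1)).map
    (fun ab => PySem.List.slice feature_desc_list (some ab.1) (some ab.2))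

-- ===== PRECONDITION & SPEC =====
def Spec_split_features_as_multiple_sections_py (feature_desc_list : List (List (String × String))) (out : List (List (List (String × String)))) : Prop := out = split_features_as_multiple_sections_py_alt feature_desc_list
instance (feature_desc_list : List (List (String × String))) (out : List (List (List (String × String)))) : Decidable (Spec_split_features_as_multiple_sections_py feature_desc_list out) := by unfold Spec_split_features_as_multiple_sections_py; infer_instance

-- ===== CLAIM (what is proved, stated in full; the proofs are below) =====
def Claim_equal_split_features_as_multiple_sections_py : Prop := ∀ (feature_desc_list : List (List (String × String))), Dom_split_features_as_multiple_sections_py feature_desc_list → Spec_split_features_as_multiple_sections_py feature_desc_list (split_features_as_multiple_sections_py feature_desc_list)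

-- ===== LEMMAS AND PROOFS =====

-- reference recursion for A: sections of l given the open (unflushed) prefix temp
def pvG (temp : List (List (String × String))) : List (List (String × String)) → List (List (List (String × String)))
  | [] => [temp]
  | x :: xs =>
    if pvTitle x then
      (if temp ≠ [] then temp :: pvG [x] xs else pvG [x] xs)
    else pvG (temp ++ [x]) xs

-- right-to-left reference: (open leading section, closed sections) of l
def pvOC : List (List (String × String)) → List (List (String × String)) × List (List (List (String × String)))
  | [] => ([], [])
  | x :: xs =>
    let oc := pvOC xs
    if pvTitle x then ([], (x :: oc.1) :: oc.2) else (x :: oc.1, oc.2)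

theorem pvA_eq_g (l : List (List (String × String)))
    (final : List (List (List (String × String)))) (temp : List (List (String × String))) :
    (l.foldl pvStepA (final, temp)).1 ++ [(l.foldl pvStepA (final, temp)).2]
      = final ++ pvG temp l := by
  induction l generalizing final temp with
  | nil => simp [pvG]
  | cons x xs ih =>
    simp only [List.foldl_cons, pvStepA, pvG]
    by_cases ht : pvTitle x
    · simp only [ht, if_true]
      by_cases hne : temp ≠ []
      · simp [hne, ih, List.append_assoc]
      · simp [hne, ih]
    · simp [ht, ih]

theorem pvG_eq_oc (l : List (List (String × String))) (temp : List (List (String × String))) :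
    pvG temp l
      = (if temp ++ (pvOC l).1 = [] ∧ (pvOC l).2 ≠ [] then (pvOC l).2
         else (temp ++ (pvOC l).1) :: (pvOC l).2) := by
  induction l generalizing temp with
  | nil => simp [pvG, pvOC]
  | cons x xs ih =>
    simp only [pvG, pvOC]
    by_cases ht : pvTitle x
    · simp only [ht, if_true]
      by_cases hne : temp ≠ []
      · simp [hne, ih]
      · simp only [hne, if_false]
        rw [ih]
        simp only [ne_eq, not_not] at hne
        simp [hne]
    · simp only [ht]
      rw [ih (temp ++ [x])]
      have hne : ¬(temp ++ [x] ++ (pvOC xs).1 = [] ∧ (pvOC xs).2 ≠ []) := by simp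
      rw [if_neg hne]
      simp

-- ---- B-side proof machinery: natural-number boundary indices and slicing ----

-- Nat-level title indices
def pvTIdx : List (List (String × String)) → List Nat
  | [] => []
  | x :: xs => if pvTitle x then 0 :: (pvTIdx xs).map (· + 1) else (pvTIdx xs).map (· + 1)

def pvSec (l : List (List (String × String))) (a b : Nat) : List (List (String × String)) :=
  (l.drop a).take (b - a)

def pvSecs (l : List (List (String × String))) : List Nat → List (List (List (String × String)))
  | a :: b :: r => pvSec l a b :: pvSecs l (b :: r)
  | _ => []

theorem pvEnumShift (xs : List (List (String × String))) (s : Int) :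
    PySem.List.enumerate xs (s + 1) = (PySem.List.enumerate xs s).map (fun p => (p.1 + 1, p.2)) := by
  induction xs generalizing s with
  | nil => simp [PySem.List.enumerate_nil]
  | cons x xs ih => simp [PySem.List.enumerate_cons, ih]

theorem pvBoundsB_eq (l : List (List (String × String))) :
    pvBoundsB l = (pvTIdx l).map (fun n : Nat => (n : Int)) := by
  induction l with
  | nil => simp [pvBoundsB, pvTIdx, PySem.List.enumerate_nil]
  | cons x xs ih =>
    have h1 : PySem.List.enumerate (x :: xs) 0
        = (0, x) :: (PySem.List.enumerate xs 0).map (fun p => (p.1 + 1, p.2)) := by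
      rw [PySem.List.enumerate_cons, show (0 : Int) + 1 = 0 + 1 by ring, pvEnumShift]
    have h2 : pvBoundsB (x :: xs)
        = (if pvTitle x then [(0 : Int)] else []) ++ (pvBoundsB xs).map (· + 1) := by
      unfold pvBoundsB
      rw [h1, List.filter_cons]
      by_cases ht : pvTitle x
      · simp [ht, List.filter_map, Function.comp_def, List.map_map]
      · simp [ht, List.filter_map, Function.comp_def, List.map_map]
    have hcast : ((pvTIdx xs).map (fun n : Nat => (n : Int))).map (· + 1)
        = ((pvTIdx xs).map (· + 1)).map (fun n : Nat => (n : Int)) := by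
      simp [List.map_map, Function.comp_def]
    rw [h2, ih, hcast]
    by_cases ht : pvTitle x
    · simp [pvTIdx, ht]
    · simp [pvTIdx, ht]

theorem pvSec_shift (x : List (String × String)) (l : List (List (String × String))) (a b : Nat) :
    pvSec (x :: l) (a + 1) (b + 1) = pvSec l a b := by
  simp [pvSec]

theorem pvSecs_shift (x : List (String × String)) (l : List (List (String × String))) (bs : List Nat) :
    pvSecs (x :: l) (bs.map (· + 1)) = pvSecs l bs := by
  induction bs with
  | nil => simp [pvSecs]
  | cons a bs ih =>
    cases bs with
    | nil => simp [pvSecs]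
    | cons b r =>
      simp only [List.map_cons, pvSecs] at *
      rw [pvSec_shift, ih]

theorem pvZipSecs (l : List (List (String × String))) (bs : List Nat) :
    (((bs.map (fun n : Nat => (n : Int))).zip ((bs.map (fun n : Nat => (n : Int))).drop 1)).map
      (fun ab => PySem.List.slice l (some ab.1) (some ab.2))) = pvSecs l bs := by
  induction bs with
  | nil => simp [pvSecs]
  | cons a bs ih =>
    cases bs with
    | nil => simp [pvSecs]
    | cons b r =>
      simp only [List.map_cons, List.drop_succ_cons, List.drop_zero, List.zip_cons_cons,
        List.map_cons, pvSecs] at *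
      rw [PySem.List.slice_natCast, ih]
      rfl

-- main invariant: the head boundary cuts off the open section, the rest give the closed ones
theorem pvM (l : List (List (String × String))) :
    l.take ((pvTIdx l ++ [l.length]).headI) = (pvOC l).1
      ∧ pvSecs l (pvTIdx l ++ [l.length]) = (pvOC l).2 := by
  induction l with
  | nil => simp [pvTIdx, pvOC, pvSecs]
  | cons x xs ih =>
    obtain ⟨ih1, ih2⟩ := ih
    obtain ⟨h, rest, hhr⟩ : ∃ h rest, pvTIdx xs ++ [xs.length] = h :: rest := by
      cases hx : pvTIdx xs ++ [xs.length] with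
      | nil => simp at hx
      | cons h r => exact ⟨h, r, rfl⟩
    have hmap : (pvTIdx xs).map (· + 1) ++ [xs.length + 1]
        = (pvTIdx xs ++ [xs.length]).map (· + 1) := by simp
    rw [hhr] at ih1 ih2 hmap
    simp only [List.headI] at ih1
    by_cases ht : pvTitle x
    · constructor
      · simp only [pvTIdx, pvOC, List.length_cons]
        rw [if_pos ht, if_pos ht]
        simp
      · simp only [pvTIdx, pvOC, List.length_cons]
        rw [if_pos ht, if_pos ht]
        rw [List.cons_append, hmap]
        simp only [List.map_cons, pvSecs]
        rw [show ((h + 1) :: rest.map (· + 1)) = ((h :: rest).map (· + 1)) by simp,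
          pvSecs_shift, ih2, ← ih1]
        simp [pvSec]
    · constructor
      · simp only [pvTIdx, pvOC, List.length_cons]
        rw [if_neg ht, if_neg ht]
        rw [hmap]
        simp only [List.map_cons, List.headI]
        rw [List.take_succ_cons, ih1]
      · simp only [pvTIdx, pvOC, List.length_cons]
        rw [if_neg ht, if_neg ht]
        rw [hmap, pvSecs_shift, ih2]

theorem pvB_eq_form (l : List (List (String × String))) :
    split_features_as_multiple_sections_py_alt l
      = (if (pvOC l).1 = [] ∧ (pvOC l).2 ≠ [] then (pvOC l).2
         else (pvOC l).1 :: (pvOC l).2) := by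
  obtain ⟨hM1, hM2⟩ := pvM l
  unfold split_features_as_multiple_sections_py_alt
  rw [pvBoundsB_eq]
  cases hT : pvTIdx l with
  | nil =>
    -- no titles: one slice, the whole list; pvOC l = (l, [])
    rw [hT] at hM1 hM2
    simp only [hT, List.map_nil, List.nil_append, List.headI] at hM1 hM2 ⊢
    simp only [pvSecs] at hM2
    have ho : (pvOC l).1 = l := by rw [← hM1]; simp
    rw [if_neg (by simp [← hM2])]
    rw [show ([(0 : Int)] ++ [(l.length : Int)]) = ([0, l.length].map (fun n : Nat => (n : Int))) by simp]
    rw [pvZipSecs]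
    simp [pvSecs, pvSec, ho, ← hM2]
  | cons h r =>
    rw [hT] at hM1 hM2
    have hlne : l ≠ [] := by
      intro hl; rw [hl] at hT; simp [pvTIdx] at hT
    by_cases hh : h = 0
    · -- list starts with a title: no extra leading boundary, first section is closed
      subst hh
      simp only [List.map_cons, Nat.cast_zero, ne_eq, not_true_eq_false, if_false]
      rw [show ((0 : Int) :: r.map (fun n : Nat => (n : Int)) ++ [(l.length : Int)])
          = ((0 :: r ++ [l.length]).map (fun n : Nat => (n : Int))) by simp]
      rw [pvZipSecs]
      simp only [List.cons_append] at hM2 ⊢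
      rw [hM2]
      have ho : (pvOC l).1 = [] := by rw [← hM1]; simp
      have hc : (pvOC l).2 ≠ [] := by
        rw [← hM2]; cases r <;> simp [pvSecs]
      rw [if_pos ⟨ho, hc⟩]
    · -- leading boundary 0 is prepended; first slice is the open section
      simp only [List.map_cons, ne_eq, Nat.cast_eq_zero, hh, not_false_eq_true, if_true]
      rw [show ((0 : Int) :: (h : Int) :: r.map (fun n : Nat => (n : Int)) ++ [(l.length : Int)])
          = ((0 :: h :: r ++ [l.length]).map (fun n : Nat => (n : Int))) by simp]
      rw [pvZipSecs]
      simp only [List.cons_append, pvSecs] at hM2 ⊢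
      rw [hM2]
      simp only [List.cons_append, List.headI] at hM1
      have ho : (pvOC l).1 ≠ [] := by
        rw [← hM1]; simp [List.take_eq_nil_iff, hh, hlne]
      rw [if_neg (by simp [ho])]
      rw [← hM1]
      simp [pvSec]

theorem pvSplit_eq (l : List (List (String × String))) :
    split_features_as_multiple_sections_py l = split_features_as_multiple_sections_py_alt l := by
  unfold split_features_as_multiple_sections_py
  rw [pvA_eq_g, pvG_eq_oc, pvB_eq_form]
  simp

-- ===== VERDICT (by name: the statement is the Claim_ definition above) =====
theorem split_features_as_multiple_sections_py_spec : Claim_equal_split_features_as_multiple_sections_py := by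
  intro l _
  exact pvSplit_eq l
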